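-- pv_equiv track=rewrite | github.com/willion852950830-hash/AI_agent | python-helper/src/formatter.py | _fix_blank_lines
-- ===== SOURCE A (Python) =====
-- def _fix_blank_lines(code: str) -> str:
--     """
--     修复空行。
--
--     Args:
--         code: 原始代码
--
--     Returns:
--         修复后的代码
--     """
--     lines = code.split('\n')
--     fixed_lines = []
--     prev_blank = False
--
--     for i, line in enumerate(lines):
--         is_blank = not line.strip()
--
--         # 类和函数定义前应有两个空行
--         if i > 0 and (line.strip().startswith('class ') or
--                      line.strip().startswith('def ') and
--                      lines[i-1].strip() and
--                      not lines[i-1].strip().startswith('@')):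
--             if not prev_blank:
--                 fixed_lines.append('')
--                 fixed_lines.append('')
--
--         # 避免连续多个空行
--         if not (is_blank and prev_blank):
--             fixed_lines.append(line)
--
--         prev_blank = is_blank
--
--     return '\n'.join(fixed_lines)
-- ===== SOURCE B (Python) =====
-- def _fix_blank_lines(code: str) -> str:
--     # Pass 1: collapse runs of consecutive blank lines into a single blank line.
--     collapsed = []
--     for line in code.split('\n'):
--         if line.strip() or not (collapsed and not collapsed[-1].strip()):
--             collapsed.append(line)
--     # Pass 2: insert two blank lines before defs/classes that follow a non-blank line.
--     out = []
--     for i, line in enumerate(collapsed):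
--         s = line.strip()
--         if i > 0 and collapsed[i - 1].strip() and (
--             s.startswith('class ')
--             or (s.startswith('def ') and not collapsed[i - 1].strip().startswith('@'))
--         ):
--             out.append('')
--             out.append('')
--         out.append(line)
--     return '\n'.join(out)
-- ===== Notes on version B (the rewrite author's own statement) =====
-- stated objective: alternative
-- what changed: Replaced A's single fused loop (prev_blank state plus conditional insert-and-skip per line) by two independent passes: first collapse runs of blank lines, then insert the two blank lines before class/def headers by inspecting the collapsed neighbour.
import Mathlib
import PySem

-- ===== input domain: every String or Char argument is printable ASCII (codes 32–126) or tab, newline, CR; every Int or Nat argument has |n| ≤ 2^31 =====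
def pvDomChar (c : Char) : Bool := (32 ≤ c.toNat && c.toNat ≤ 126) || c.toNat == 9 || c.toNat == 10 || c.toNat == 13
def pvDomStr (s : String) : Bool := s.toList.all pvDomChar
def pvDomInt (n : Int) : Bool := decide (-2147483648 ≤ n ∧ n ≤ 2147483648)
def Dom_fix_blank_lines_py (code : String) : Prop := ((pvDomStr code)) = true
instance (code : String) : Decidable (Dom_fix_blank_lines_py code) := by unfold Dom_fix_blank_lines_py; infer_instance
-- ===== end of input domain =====

-- B replaces A's fused single loop by two passes (collapse blank runs, then insert
-- blank lines before class/def); same cost, different decomposition (objective: alternative).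

-- ===== PORT A =====
-- literal port of A's single loop: 'for i, line in enumerate(lines)' as structural
-- recursion carrying the index i, prev_blank and the accumulator; lines[i-1] via pyGet?
def fixA_go (lines : List String) : Nat → Bool → List String → List String → List String
  | _, _, acc, [] => acc
  | i, prev_blank, acc, line :: rest =>
    let is_blank := PySem.Str.strip line == ""
    let prevS := PySem.Str.strip ((PySem.List.pyGet? lines ((i : Int) - 1)).getD "")
    let acc :=
      if decide (0 < i) &&
          (PySem.Str.startswith (PySem.Str.strip line) "class " ||
            (PySem.Str.startswith (PySem.Str.strip line) "def " &&
              !(prevS == "") && !(PySem.Str.startswith prevS "@"))) then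
        (if !prev_blank then acc ++ [""] ++ [""] else acc)
      else acc
    let acc := if !(is_blank && prev_blank) then acc ++ [line] else acc
    fixA_go lines (i + 1) is_blank acc rest

def fix_blank_lines_py (code : String) : String :=
  let lines := (PySem.Str.split? code "\n").getD []
  PySem.Str.join "\n" (fixA_go lines 0 false [] lines)

-- ===== PORT B =====
-- pass 1 of Source B: collapse consecutive blank lines
def fixB_collapse : List String → List String → List String
  | acc, [] => acc
  | acc, line :: rest =>
    let lastBlank := !acc.isEmpty && (PySem.Str.strip ((PySem.List.pyGet? acc (-1)).getD "") == "")
    let acc := if !(PySem.Str.strip line == "") || !lastBlank then acc ++ [line] else acc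
    fixB_collapse acc rest

-- pass 2 of Source B: insert two blank lines before class/def following a non-blank line
def fixB_insert (collapsed : List String) : Nat → List String → List String → List String
  | _, acc, [] => acc
  | i, acc, line :: rest =>
    let s := PySem.Str.strip line
    let p := PySem.Str.strip ((PySem.List.pyGet? collapsed ((i : Int) - 1)).getD "")
    let acc :=
      if decide (0 < i) && !(p == "") &&
          (PySem.Str.startswith s "class " ||
            (PySem.Str.startswith s "def " && !(PySem.Str.startswith p "@"))) then
        acc ++ [""] ++ [""] ++ [line]
      else acc ++ [line]
    fixB_insert collapsed (i + 1) acc rest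

def fix_blank_lines_py_alt (code : String) : String :=
  let collapsed := fixB_collapse [] ((PySem.Str.split? code "\n").getD [])
  PySem.Str.join "\n" (fixB_insert collapsed 0 [] collapsed)

-- ===== PRECONDITION & SPEC =====
def Spec_fix_blank_lines_py (code : String) (out : String) : Prop := out = fix_blank_lines_py_alt code
instance (code : String) (out : String) : Decidable (Spec_fix_blank_lines_py code out) := by unfold Spec_fix_blank_lines_py; infer_instance

-- ===== CLAIM (what is proved, stated in full; the proofs are below) =====
def Claim_equal_fix_blank_lines_py : Prop := ∀ (code : String), Dom_fix_blank_lines_py code → Spec_fix_blank_lines_py code (fix_blank_lines_py code)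

-- ===== LEMMAS AND PROOFS =====

def pvBlank (l : String) : Bool := PySem.Str.strip l == ""
def pvCls (l : String) : Bool := PySem.Str.startswith (PySem.Str.strip l) "class "
def pvDef (l : String) : Bool := PySem.Str.startswith (PySem.Str.strip l) "def "
def pvAt (l : String) : Bool := PySem.Str.startswith (PySem.Str.strip l) "@"

def pvBlankO : Option String → Bool
  | none => false
  | some q => pvBlank q

-- characterisation of A's loop: recursion on the lines carrying the previous line
def pvSpec : Option String → List String → List String
  | _, [] => []
  | none, x :: r => x :: pvSpec (some x) r
  | some q, x :: r =>
    (if (pvCls x || (pvDef x && !pvBlank q && !pvAt q)) && !pvBlank q then ["", ""] else []) ++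
    (if pvBlank q && pvBlank x then [] else [x]) ++ pvSpec (some x) r

-- characterisation of B's pass 1
def pvCrec : Bool → List String → List String
  | _, [] => []
  | f, x :: r => if pvBlank x && f then pvCrec f r else x :: pvCrec (pvBlank x) r

-- characterisation of B's pass 2
def pvPrec : Option String → List String → List String
  | _, [] => []
  | none, x :: r => x :: pvPrec (some x) r
  | some q, x :: r =>
    (if !pvBlank q && (pvCls x || (pvDef x && !pvAt q)) then ["", ""] else []) ++
    x :: pvPrec (some x) r

theorem pvGet_neg_one (l : List String) : PySem.List.pyGet? l (-1) = l.getLast? := by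
  induction l using List.reverseRecOn with
  | nil => simp [PySem.List.pyGet?, PySem.List.pyIdx?]
  | append_singleton xs x _ => simp [PySem.List.pyGet?_neg_one_append_singleton]

theorem pvGetLast_lookup (xs ys : List String) (q : String) (h : xs.getLast? = some q) :
    (PySem.List.pyGet? (xs ++ ys) ((xs.length : Int) - 1)).getD "" = q := by
  have hne : xs ≠ [] := by rintro rfl; simp at h
  have hlen : 0 < xs.length := List.length_pos_of_ne_nil hne
  have hcast : ((xs.length : Int) - 1) = ((xs.length - 1 : Nat) : Int) := by omega
  rw [hcast, PySem.List.pyGet?_natCast, List.getElem?_append_left (by omega)]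
  rw [← List.getLast?_eq_getElem?, h]
  rfl

theorem fixA_go_spec (rest : List String) : ∀ (pre acc : List String),
    fixA_go (pre ++ rest) pre.length (pvBlankO pre.getLast?) acc rest =
      acc ++ pvSpec pre.getLast? rest := by
  induction rest with
  | nil => intro pre acc; simp [fixA_go, pvSpec]
  | cons line r ih =>
    intro pre acc
    cases hpre : pre.getLast? with
    | none =>
      have hpe : pre = [] := List.getLast?_eq_none_iff.mp hpre
      subst hpe
      have hih := ih [line] (acc ++ [line])
      simp only [List.singleton_append, List.length_singleton,
        List.getLast?_singleton, pvBlankO, pvBlank] at hih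
      simp [fixA_go, pvSpec, pvBlankO, hih]
    | some q =>
      have hne : pre ≠ [] := by rintro rfl; simp at hpre
      have hQ := pvGetLast_lookup pre (line :: r) q hpre
      have hpos : decide (0 < pre.length) = true := by
        simpa using List.length_pos_of_ne_nil hne
      have hih := ih (pre ++ [line])
      simp only [List.append_assoc, List.singleton_append, List.length_append,
        List.length_singleton, List.getLast?_concat, pvBlankO, pvBlank] at hih
      simp only [fixA_go, hQ, hpos, Bool.true_and, pvBlankO, pvBlank]
      rw [hih, pvSpec]
      simp only [pvBlank, pvCls, pvDef, pvAt]
      split_ifs <;> simp_all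

theorem pvLastBlank_eq (acc : List String) :
    (!acc.isEmpty && (PySem.Str.strip ((PySem.List.pyGet? acc (-1)).getD "") == "")) =
      pvBlankO acc.getLast? := by
  rw [pvGet_neg_one]
  match h : acc.getLast? with
  | none => have : acc = [] := List.getLast?_eq_none_iff.mp h; subst this; rfl
  | some q =>
    have hne : acc ≠ [] := by rintro rfl; simp at h
    simp [List.isEmpty_eq_false_iff.mpr hne, pvBlankO, pvBlank]

theorem fixB_collapse_spec (rest : List String) : ∀ (acc : List String),
    fixB_collapse acc rest = acc ++ pvCrec (pvBlankO acc.getLast?) rest := by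
  induction rest with
  | nil => intro acc; simp [fixB_collapse, pvCrec]
  | cons line r ih =>
    intro acc
    rw [fixB_collapse]
    simp only [pvLastBlank_eq]
    by_cases hb : (pvBlank line && pvBlankO acc.getLast?) = true
    · have h1 : (!(PySem.Str.strip line == "") || !pvBlankO acc.getLast?) = false := by
        simp only [pvBlank] at hb
        simp only [Bool.or_eq_false_iff, Bool.not_eq_eq_eq_not, Bool.not_false]
        exact ⟨by simp [Bool.and_eq_true] at hb; simp [hb.1], by simp [Bool.and_eq_true] at hb; simp [hb.2]⟩
      simp only [h1, Bool.false_eq_true, if_false]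
      rw [ih acc, pvCrec, if_pos hb]
    · have h1 : (!(PySem.Str.strip line == "") || !pvBlankO acc.getLast?) = true := by
        simp only [pvBlank] at hb
        simp only [Bool.or_eq_true, Bool.not_eq_eq_eq_not, Bool.not_true]
        by_cases hs : (PySem.Str.strip line == "") = true
        · right
          simp only [Bool.and_eq_true] at hb
          cases hB : pvBlankO acc.getLast? with
          | false => rfl
          | true => exact absurd ⟨hs, hB⟩ hb
        · left; simp at hs ⊢; exact hs
      simp only [h1, if_true]
      rw [ih (acc ++ [line])]
      rw [pvCrec, if_neg hb]
      simp [pvBlankO]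

theorem fixB_insert_spec (rest : List String) : ∀ (pre acc : List String),
    fixB_insert (pre ++ rest) pre.length acc rest = acc ++ pvPrec pre.getLast? rest := by
  induction rest with
  | nil => intro pre acc; simp [fixB_insert, pvPrec]
  | cons line r ih =>
    intro pre acc
    cases hpre : pre.getLast? with
    | none =>
      have hpe : pre = [] := List.getLast?_eq_none_iff.mp hpre
      subst hpe
      have hih := ih [line] (acc ++ [line])
      simp only [List.singleton_append, List.length_singleton,
        List.getLast?_singleton] at hih
      simp [fixB_insert, pvPrec, hih]
    | some q =>
      have hne : pre ≠ [] := by rintro rfl; simp at hpre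
      have hQ := pvGetLast_lookup pre (line :: r) q hpre
      have hpos : decide (0 < pre.length) = true := by
        simpa using List.length_pos_of_ne_nil hne
      have hih := ih (pre ++ [line])
      simp only [List.append_assoc, List.singleton_append, List.length_append,
        List.length_singleton, List.getLast?_concat] at hih
      simp only [fixB_insert, hQ, hpos, Bool.true_and]
      rw [hih, pvPrec]
      simp only [pvBlank, pvCls, pvDef, pvAt]
      split_ifs <;> simp_all

theorem pvPrec_blank_congr (l : List String) (q q' : String)
    (h : pvBlank q = true) (h' : pvBlank q' = true) :
    pvPrec (some q) l = pvPrec (some q') l := by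
  cases l with
  | nil => rfl
  | cons x r => simp [pvPrec, h, h']

theorem pvSpec_eq_prec_crec (rest : List String) : ∀ (p : Option String),
    pvSpec p rest = pvPrec p (pvCrec (pvBlankO p) rest) := by
  induction rest with
  | nil => intro p; cases p <;> simp [pvSpec, pvCrec, pvPrec]
  | cons x r ih =>
    intro p
    match p with
    | none =>
      have e2 : pvCrec (pvBlankO none) (x :: r) = x :: pvCrec (pvBlank x) r := by
        simp [pvCrec, pvBlankO]
      rw [e2, pvSpec, pvPrec, ih (some x)]
      rfl
    | some q =>
      by_cases hq : pvBlank q = true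
      · by_cases hx : pvBlank x = true
        · have e1 : pvSpec (some q) (x :: r) = pvSpec (some x) r := by
            simp [pvSpec, hq, hx]
          have e2 : pvCrec (pvBlankO (some q)) (x :: r) = pvCrec true r := by
            simp [pvCrec, pvBlankO, hq, hx]
          have e3 : pvCrec (pvBlankO (some x)) r = pvCrec true r := by
            simp [pvBlankO, hx]
          rw [e1, e2, ih (some x), e3, pvPrec_blank_congr (pvCrec true r) x q hx hq]
        · have e2 : pvCrec (pvBlankO (some q)) (x :: r) = x :: pvCrec (pvBlank x) r := by
            simp [pvCrec, pvBlankO, hx]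
          rw [e2, pvSpec, pvPrec, ih (some x)]
          simp [hq, hx, pvBlankO]
      · have e2 : pvCrec (pvBlankO (some q)) (x :: r) = x :: pvCrec (pvBlank x) r := by
          simp [pvCrec, pvBlankO, hq]
        rw [e2, pvSpec, pvPrec, ih (some x)]
        simp [hq, pvBlankO]

-- ===== VERDICT (by name: the statement is the Claim_ definition above) =====
theorem fix_blank_lines_py_spec : Claim_equal_fix_blank_lines_py := by
  intro code _
  unfold Spec_fix_blank_lines_py fix_blank_lines_py fix_blank_lines_py_alt
  have hA := fixA_go_spec ((PySem.Str.split? code "\n").getD []) [] []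
  have hC := fixB_collapse_spec ((PySem.Str.split? code "\n").getD []) []
  simp only [List.nil_append, List.length_nil, List.getLast?_nil, pvBlankO] at hA hC
  have hB := fixB_insert_spec (fixB_collapse [] ((PySem.Str.split? code "\n").getD [])) [] []
  simp only [List.nil_append, List.length_nil, List.getLast?_nil] at hB
  rw [hC] at hB
  simp only [hA, pvSpec_eq_prec_crec, pvBlankO, hC, hB]
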